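-- pv_equiv track=rewrite | github.com/Ed-Cheng/impoved-information-retrieval-model | data_representation.py | relevance2dictionary
-- ===== SOURCE A (Python) =====
-- def relevance2dictionary(ydata):
--     '''store relevant qid/pid to dictionary'''
--     relevant_dict = {}
--     for row in ydata:
--         if row[0] != 0.0:
--             qid = str(int(row[1]))
--             pid = str(int(row[2]))
--             if qid not in relevant_dict:
--                 relevant_dict[qid] = [pid]
--             else:
--                 relevant_dict[qid].append(pid)
--
--     return relevant_dict
-- ===== SOURCE B (Python) =====
-- def relevance2dictionary(ydata):
--     '''store relevant qid/pid to dictionary'''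
--     pairs = [(str(int(row[1])), str(int(row[2]))) for row in ydata if row[0] != 0.0]
--     keys = list(dict.fromkeys(q for q, _ in pairs))
--     return {q: [p for q2, p in pairs if q2 == q] for q in keys}
-- ===== Notes on version B (the rewrite author's own statement) =====
-- stated objective: alternative
-- what changed: Instead of one pass that mutates a dict with an insert-or-append branch, B first extracts a flat list of (qid,pid) pairs, dedups qids in first-occurrence order, and builds the result by a per-key scan of the pair list.
import Mathlib
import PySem

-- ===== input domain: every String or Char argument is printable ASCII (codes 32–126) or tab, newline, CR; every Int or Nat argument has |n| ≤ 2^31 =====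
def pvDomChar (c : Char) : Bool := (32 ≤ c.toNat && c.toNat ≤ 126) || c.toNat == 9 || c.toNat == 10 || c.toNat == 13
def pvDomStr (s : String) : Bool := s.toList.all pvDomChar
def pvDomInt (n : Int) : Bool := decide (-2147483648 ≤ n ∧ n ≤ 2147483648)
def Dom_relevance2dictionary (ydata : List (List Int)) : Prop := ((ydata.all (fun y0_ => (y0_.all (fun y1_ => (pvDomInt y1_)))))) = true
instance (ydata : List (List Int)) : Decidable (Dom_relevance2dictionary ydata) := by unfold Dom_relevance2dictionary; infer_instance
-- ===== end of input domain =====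

-- B replaces A's single mutating-dict pass by: flat (qid,pid) pair extraction, first-occurrence key dedup, then a per-key scan; same return value.

-- ===== PORT A =====
-- A: one pass over ydata; for each relevant row, insert a fresh [pid] or append to the existing list.
def relevance2dictionary (ydata : List (List Int)) : List (String × List String) :=
  (ydata.foldl
    (fun (d : PySem.Dict String (List String)) row =>
      if ((PySem.List.pyGet? row 0).getD 0) ≠ 0 then
        let qid := PySem.Int.toStr ((PySem.List.pyGet? row 1).getD 0)
        let pid := PySem.Int.toStr ((PySem.List.pyGet? row 2).getD 0)
        if d.contains qid = false then
          d.insert qid [pid]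
        else
          d.insert qid ((d.getD qid []) ++ [pid])
      else d)
    PySem.Dict.empty).items

-- ===== PORT B =====
-- pairs = [(str(int(row[1])), str(int(row[2]))) for row in ydata if row[0] != 0.0]
def pvPairs (ydata : List (List Int)) : List (String × String) :=
  (ydata.filter (fun row => ((PySem.List.pyGet? row 0).getD 0) != 0)).map
    (fun row => (PySem.Int.toStr ((PySem.List.pyGet? row 1).getD 0),
                 PySem.Int.toStr ((PySem.List.pyGet? row 2).getD 0)))

def relevance2dictionary_alt (ydata : List (List Int)) : List (String × List String) :=
  let pairs := pvPairs ydata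
  -- keys = list(dict.fromkeys(q for q, _ in pairs))  (first-occurrence dedup = PySem.Set.ofList)
  let keys := PySem.Set.ofList (pairs.map Prod.fst)
  keys.map (fun q => (q, (pairs.filter (fun pr => pr.1 == q)).map Prod.snd))

-- ===== PRECONDITION & SPEC =====
-- Pre_ excludes exactly the rows on which Python A raises IndexError: an empty row (row[0]),
-- or a row with nonzero first entry and fewer than 3 entries (row[1]/row[2]).
def Pre_relevance2dictionary (ydata : List (List Int)) : Prop :=
  ∀ row ∈ ydata, row ≠ [] ∧ (row.headI ≠ 0 → 3 ≤ row.length)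
instance (ydata : List (List Int)) : Decidable (Pre_relevance2dictionary ydata) := by
  unfold Pre_relevance2dictionary; infer_instance

def pvWitness_relevance2dictionary : List (List Int) := [[1, 2, 3], [0], [1, 2, 4]]

def Spec_relevance2dictionary (ydata : List (List Int)) (out : List (String × List String)) : Prop := out = relevance2dictionary_alt ydata
instance (ydata : List (List Int)) (out : List (String × List String)) : Decidable (Spec_relevance2dictionary ydata out) := by unfold Spec_relevance2dictionary; infer_instance

-- ===== CLAIM (what is proved, stated in full; the proofs are below) =====
def Claim_equal_relevance2dictionary : Prop := ∀ (ydata : List (List Int)), Dom_relevance2dictionary ydata → Pre_relevance2dictionary ydata → Spec_relevance2dictionary ydata (relevance2dictionary ydata)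

-- ===== LEMMAS AND PROOFS =====

-- A's loop body, at a relevant row, is exactly Dict.modify with default [].
theorem pvStep_eq_modify (d : PySem.Dict String (List String)) (q p : String) :
    (if d.contains q = false then d.insert q [p] else d.insert q ((d.getD q []) ++ [p]))
      = d.modify q [] (· ++ [p]) := by
  by_cases h : d.contains q = false
  · simp [PySem.Dict.modify, PySem.Dict.getD_of_not_contains, h]
  · simp [h, PySem.Dict.modify]

-- A's fold over rows equals the grouping fold over the extracted pair list.
theorem pvFold_rows_eq_fold_pairs (ydata : List (List Int)) (d : PySem.Dict String (List String)) :
    ydata.foldl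
      (fun (d : PySem.Dict String (List String)) row =>
        if ((PySem.List.pyGet? row 0).getD 0) ≠ 0 then
          let qid := PySem.Int.toStr ((PySem.List.pyGet? row 1).getD 0)
          let pid := PySem.Int.toStr ((PySem.List.pyGet? row 2).getD 0)
          if d.contains qid = false then
            d.insert qid [pid]
          else
            d.insert qid ((d.getD qid []) ++ [pid])
        else d) d
    = (pvPairs ydata).foldl (fun d p => d.modify p.1 [] (· ++ [p.2])) d := by
  induction ydata generalizing d with
  | nil => rfl
  | cons row rest ih =>
    by_cases h : ((PySem.List.pyGet? row 0).getD 0) ≠ 0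
    · have hb : (((PySem.List.pyGet? row 0).getD 0) != 0) = true := by
        simpa [bne_iff_ne] using h
      simp only [pvPairs, List.foldl_cons, if_pos h, List.filter_cons, hb, if_true,
        List.map_cons]
      rw [pvStep_eq_modify]
      exact ih _
    · have hb : (((PySem.List.pyGet? row 0).getD 0) != 0) = false := by
        simpa [bne_iff_ne] using h
      simp only [pvPairs, List.foldl_cons, if_neg h, List.filter_cons, hb,
        Bool.false_eq_true, if_false]
      exact ih d

theorem relevance2dictionary_eq_alt (ydata : List (List Int)) :
    relevance2dictionary ydata = relevance2dictionary_alt ydata := by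
  unfold relevance2dictionary relevance2dictionary_alt
  rw [pvFold_rows_eq_fold_pairs]
  set pairs := pvPairs ydata with hp
  have hkeys : ((pairs.foldl (fun d p => d.modify p.1 [] (· ++ [p.2])) PySem.Dict.empty).keys)
      = PySem.Set.ofList (pairs.map Prod.fst) := by
    rw [PySem.Dict.keys_foldl_modify_key]
    simp [PySem.Set.update_nil_left]
  have hnd : ((pairs.foldl (fun d p => d.modify p.1 [] (· ++ [p.2])) PySem.Dict.empty).keys).Nodup := by
    rw [hkeys]; exact PySem.Set.nodup_ofList _
  rw [PySem.Dict.items_eq_map_keys _ hnd ([] : List String), hkeys]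
  apply List.map_congr_left
  intro q hq
  have := PySem.Dict.getD_foldl_modify_append pairs (PySem.Dict.empty (κ := String) (ν := List String)) q
  simp only [PySem.Dict.getD_empty] at this
  simp [this]

-- ===== VERDICT (by name: the statement is the Claim_ definition above) =====
theorem relevance2dictionary_spec : Claim_equal_relevance2dictionary := by
  intro ydata _ _
  exact relevance2dictionary_eq_alt ydata
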